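-- pv_equiv track=rewrite | github.com/b-xiang/taskBus | module_templates/python2/tbinterface.py | args2dict
-- ===== SOURCE A (Python) =====
-- def args2dict(argv):
--     #1. Interpret cmd line
--     totalLen = len(argv)
--     args = {}
--     currKey = '_CMD_'
--     currValue = []
--     for it in range(totalLen):
--         currArg = argv[it].strip();
--         if currArg.startswith('-'):
--             args[currKey] = []
--             args[currKey].extend(currValue)
--             parts = currArg.split('=')
--             if len(parts)>0:
--                 currKey = parts[0]
--                 del parts[0]
--             currValue = []
--             currValue.extend(parts)
--         else:
--             currValue.append(currArg)
--     args[currKey] = []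
--     args[currKey].extend(currValue)
--     return args
-- ===== SOURCE B (Python) =====
-- def _split_at_flag(toks):
--     """(toks[:i], toks[i:]) at the first index i whose token starts with '-'; (toks, []) if none."""
--     for i, t in enumerate(toks):
--         if t.startswith('-'):
--             return toks[:i], toks[i:]
--     return toks, []
--
--
-- def args2dict(argv):
--     toks = [t.strip() for t in argv]
--     cmd, rest = _split_at_flag(toks)
--     args = {'_CMD_': cmd}
--     while rest:
--         parts = rest[0].split('=')
--         vals, rest = _split_at_flag(rest[1:])
--         args[parts[0]] = parts[1:] + vals
--     return args
-- ===== Notes on version B (the rewrite author's own statement) =====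
-- stated objective: alternative
-- what changed: Replaces A's stateful buffer-and-flush single pass (currKey/currValue state machine) by stripping all tokens once and then repeatedly splitting the token list at the next flag, emitting one dict assignment per segment.
import Mathlib
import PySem

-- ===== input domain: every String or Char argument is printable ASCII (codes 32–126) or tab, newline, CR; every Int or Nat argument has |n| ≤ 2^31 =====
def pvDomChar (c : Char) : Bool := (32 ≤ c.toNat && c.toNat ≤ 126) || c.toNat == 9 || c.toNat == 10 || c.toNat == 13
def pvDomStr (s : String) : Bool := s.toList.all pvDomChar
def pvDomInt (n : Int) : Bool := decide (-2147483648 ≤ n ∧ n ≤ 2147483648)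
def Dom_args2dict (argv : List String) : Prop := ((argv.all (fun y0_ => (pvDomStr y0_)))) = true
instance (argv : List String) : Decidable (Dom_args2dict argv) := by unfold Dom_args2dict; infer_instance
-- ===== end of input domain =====

-- B replaces A's stateful buffer-and-flush single pass by split-at-next-flag segments; objective: alternative decomposition (same cost).

-- ===== PORT A =====
-- Literal port of A: for it in range(len(argv)) with state (args, currKey, currValue);
-- 'args[currKey] = []; args[currKey].extend(currValue)' is insert [] followed by modify (· ++ currValue);
-- '.split("=")' is split? (sep "=" is nonempty, so never none; .getD [] only discharges the Option).
def args2dict (argv : List String) : List (String × List String) :=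
  let totalLen := PySem.List.len argv
  let st :=
    (PySem.List.pyRange 0 totalLen).foldl
      (fun (st : PySem.Dict String (List String) × String × List String) it =>
        let currArg := PySem.Str.strip (PySem.List.pyGetD argv it "")
        if PySem.Str.startswith currArg "-" then
          let args := st.1.insert st.2.1 []
          let args := args.modify st.2.1 [] (· ++ st.2.2)
          let parts := (PySem.Str.split? currArg "=").getD []
          let kp := if parts.length > 0 then (parts.head!, parts.tail) else (st.2.1, parts)
          (args, kp.1, ([] : List String) ++ kp.2)
        else
          (st.1, st.2.1, st.2.2 ++ [currArg]))
      (PySem.Dict.empty, "_CMD_", ([] : List String))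
  let args := st.1.insert st.2.1 []
  let args := args.modify st.2.1 [] (· ++ st.2.2)
  args.items

-- ===== PORT B =====
-- _split_at_flag(toks) = (toks[:i], toks[i:]) at the first flag index i, (toks, []) if none;
-- ported as the structural recursion producing the same two slices.
def splitAtFlag (toks : List String) : List String × List String :=
  match toks with
  | [] => ([], [])
  | t :: rest =>
    if PySem.Str.startswith t "-" then ([], t :: rest)
    else
      let p := splitAtFlag rest
      (t :: p.1, p.2)

theorem splitAtFlag_snd_length_le (toks : List String) : (splitAtFlag toks).2.length ≤ toks.length := by
  induction toks with
  | nil => simp [splitAtFlag]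
  | cons t rest ih =>
    simp only [splitAtFlag]
    split
    · simp
    · simpa using Nat.le_succ_of_le ih

-- the 'while rest:' loop of B, as a recursive function on rest
def emitSegs (args : PySem.Dict String (List String)) (rest : List String) :
    PySem.Dict String (List String) :=
  match rest with
  | [] => args
  | t :: ts =>
    let parts := (PySem.Str.split? t "=").getD []
    let p := splitAtFlag ts
    emitSegs (args.insert parts.head! (parts.tail ++ p.1)) p.2
termination_by rest.length
decreasing_by exact Nat.lt_succ_of_le (splitAtFlag_snd_length_le ts)

def args2dict_alt (argv : List String) : List (String × List String) :=
  let toks := argv.map PySem.Str.strip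
  let p := splitAtFlag toks
  (emitSegs (PySem.Dict.ofList [("_CMD_", p.1)]) p.2).items

-- ===== PRECONDITION & SPEC =====
def Spec_args2dict (argv : List String) (out : List (String × List String)) : Prop := out = args2dict_alt argv
instance (argv : List String) (out : List (String × List String)) : Decidable (Spec_args2dict argv out) := by unfold Spec_args2dict; infer_instance

-- ===== CLAIM (what is proved, stated in full; the proofs are below) =====
def Claim_equal_args2dict : Prop := ∀ (argv : List String), Dom_args2dict argv → Spec_args2dict argv (args2dict argv)

-- ===== LEMMAS AND PROOFS =====

-- A's fold body, on an already-stripped token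
def stepA (st : PySem.Dict String (List String) × String × List String) (currArg : String) :
    PySem.Dict String (List String) × String × List String :=
  if PySem.Str.startswith currArg "-" then
    let args := st.1.insert st.2.1 []
    let args := args.modify st.2.1 [] (· ++ st.2.2)
    let parts := (PySem.Str.split? currArg "=").getD []
    let kp := if parts.length > 0 then (parts.head!, parts.tail) else (st.2.1, parts)
    (args, kp.1, ([] : List String) ++ kp.2)
  else
    (st.1, st.2.1, st.2.2 ++ [currArg])

def finalizeA (st : PySem.Dict String (List String) × String × List String) :
    PySem.Dict String (List String) :=
  (st.1.insert st.2.1 []).modify st.2.1 [] (· ++ st.2.2)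

lemma go_ne_nil (sep : List Char) :
    ∀ (fuel : Nat) (l cur : List Char) (acc : List (List Char)),
      PySem.Chars.splitOn.go sep fuel l cur acc ≠ [] := by
  intro fuel
  induction fuel with
  | zero => intro l cur acc; simp [PySem.Chars.splitOn.go]
  | succ n ih =>
    intro l cur acc
    cases l with
    | nil => simp [PySem.Chars.splitOn.go]
    | cons c rest =>
      simp only [PySem.Chars.splitOn.go]
      split
      · exact ih _ _ _
      · exact ih _ _ _

lemma split_eq_ne_nil (s : String) : (PySem.Str.split? s "=").getD [] ≠ [] := by
  simp [PySem.Str.split?, PySem.Chars.split?]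
  intro h
  exact absurd h (go_ne_nil _ _ _ _ _)

lemma insert_nil_modify (d : PySem.Dict String (List String)) (k : String) (w : List String) :
    (d.insert k []).modify k [] (· ++ w) = d.insert k w := by
  simp [PySem.Dict.modify, PySem.Dict.getD_insert_self, PySem.Dict.insert_insert_self]

lemma main_invariant (ts : List String) :
    ∀ (d : PySem.Dict String (List String)) (key : String) (acc : List String),
      finalizeA (List.foldl stepA (d, key, acc) ts)
        = emitSegs (d.insert key (acc ++ (splitAtFlag ts).1)) (splitAtFlag ts).2 := by
  induction ts with
  | nil =>
    intro d key acc
    simp [splitAtFlag, emitSegs, finalizeA, insert_nil_modify]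
  | cons t ts ih =>
    intro d key acc
    by_cases hf : PySem.Str.startswith t "-" = true
    · have hlen : 0 < ((PySem.Str.split? t "=").getD []).length :=
        List.length_pos_of_ne_nil (split_eq_ne_nil t)
      simp only [List.foldl_cons, stepA, hf, if_true, splitAtFlag]
      rw [ih]
      conv_rhs => rw [emitSegs]
      simp [insert_nil_modify, hlen]
    · simp only [List.foldl_cons, stepA, hf, splitAtFlag]
      rw [ih]
      simp [List.append_assoc]

lemma ofList_singleton (k : String) (v : List String) :
    PySem.Dict.ofList [(k, v)] = PySem.Dict.empty.insert k v := rfl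

-- ===== VERDICT (by name: the statement is the Claim_ definition above) =====
theorem args2dict_spec : Claim_equal_args2dict := by
  intro argv _
  show args2dict argv = args2dict_alt argv
  have h1 : args2dict argv = (finalizeA (List.foldl
      (fun acc j => stepA acc (PySem.Str.strip (PySem.List.pyGetD argv j "")))
      (PySem.Dict.empty, "_CMD_", ([] : List String))
      (PySem.List.pyRange 0 (PySem.List.len argv)))).items := rfl
  have h3 : args2dict_alt argv = (emitSegs
      (PySem.Dict.ofList [("_CMD_", (splitAtFlag (argv.map PySem.Str.strip)).1)])
      (splitAtFlag (argv.map PySem.Str.strip)).2).items := rfl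
  have h2 := PySem.List.foldl_pyRange_pyGetD argv "" (fun st s => stepA st (PySem.Str.strip s))
      (PySem.Dict.empty, "_CMD_", ([] : List String)) (le_refl 0)
  rw [h1, h3, ofList_singleton]
  simp only [h2]
  rw [← List.foldl_map, main_invariant]
  simp
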